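-- pv_equiv track=rewrite | github.com/Rasuldev01/NewProject | project_app/helpers.py | price_filter
-- ===== SOURCE A (Python) =====
-- def price_filter(price):
--     price = str(price)
--     price = price[::-1]
--     count = 0
--     price_new = ""
--     for i in price:
--         if count % 3 == 0:
--             price_new += "."
--         price_new += i
--         count = count + 1
--     price_new = price_new[::-1]
--     price_new = price_new[:-1]
--     return price_new
-- ===== SOURCE B (Python) =====
-- def price_filter(price):
--     s = str(price)
--     chunks = []
--     while s:
--         chunks.append(s[-3:])
--         s = s[:-3]
--     return ".".join(reversed(chunks))
-- ===== Notes on version B (the rewrite author's own statement) =====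
-- stated objective: simpler
-- what changed: B slices str(price) into three-character chunks from the right and joins them with '.', replacing A's per-character loop with a counter, two string reversals and a trailing-dot trim.
import Mathlib
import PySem

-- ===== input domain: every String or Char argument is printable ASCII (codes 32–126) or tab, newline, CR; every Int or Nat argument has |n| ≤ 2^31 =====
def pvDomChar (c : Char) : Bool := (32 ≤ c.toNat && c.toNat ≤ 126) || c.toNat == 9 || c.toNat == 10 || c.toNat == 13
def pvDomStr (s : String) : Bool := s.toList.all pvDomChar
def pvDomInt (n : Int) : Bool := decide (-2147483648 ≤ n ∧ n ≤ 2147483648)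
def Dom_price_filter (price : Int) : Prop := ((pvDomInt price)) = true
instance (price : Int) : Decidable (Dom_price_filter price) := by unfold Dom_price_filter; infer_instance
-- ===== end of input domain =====

-- B groups str(price) into three-character chunks from the right and joins them with '.',
-- instead of A's per-character counter loop with double reversal; same output, simpler.

-- ===== PORT A =====
def price_filter (price : Int) : String :=
  let s := PySem.Int.toChars price                                  -- price = str(price)
  let r := (PySem.List.slice? s none none (-1)).getD []             -- price = price[::-1]
  let fin := r.foldl (fun (st : Int × List Char) i =>               -- for i in price: …
      (st.1 + 1, (if PySem.Int.mod st.1 3 = 0 then st.2 ++ ['.'] else st.2) ++ [i])) (0, [])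
  let pn := (PySem.List.slice? fin.2 none none (-1)).getD []        -- price_new = price_new[::-1]
  String.ofList (PySem.List.slice pn none (some (-1)))              -- price_new = price_new[:-1]

-- ===== PORT B =====
-- while s: chunks.append(s[-3:]); s = s[:-3]
def pvChunks (s : List Char) : List (List Char) :=
  if h : s = [] then []
  else PySem.List.slice s (some (-3)) none :: pvChunks (PySem.List.slice s none (some (-3)))
termination_by s.length
decreasing_by
  rw [PySem.List.slice_to_neg_ofNat s 3 (by omega)]
  have hl : s.length ≠ 0 := fun h0 => h (List.eq_nil_of_length_eq_zero h0)
  simp only [List.length_take]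
  omega

def price_filter_alt (price : Int) : String :=
  String.ofList (PySem.Chars.join ['.'] (pvChunks (PySem.Int.toChars price)).reverse)

-- ===== PRECONDITION & SPEC =====
def Spec_price_filter (price : Int) (out : String) : Prop := out = price_filter_alt price
instance (price : Int) (out : String) : Decidable (Spec_price_filter price out) := by unfold Spec_price_filter; infer_instance

-- ===== CLAIM (what is proved, stated in full; the proofs are below) =====
def Claim_equal_price_filter : Prop := ∀ (price : Int), Dom_price_filter price → Spec_price_filter price (price_filter price)

-- ===== LEMMAS AND PROOFS =====

-- the characters A's loop appends while scanning the remaining reversed chars with counter c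
def pvG : List Char → Int → List Char
  | [], _ => []
  | x :: xs, c => (if PySem.Int.mod c 3 = 0 then ['.'] else []) ++ [x] ++ pvG xs (c + 1)

theorem pvFold_eq (r : List Char) (c : Int) (pn : List Char) :
    (r.foldl (fun (st : Int × List Char) i =>
      (st.1 + 1, (if PySem.Int.mod st.1 3 = 0 then st.2 ++ ['.'] else st.2) ++ [i])) (c, pn)).2
    = pn ++ pvG r c := by
  induction r generalizing c pn with
  | nil => simp [pvG]
  | cons x xs ih =>
    simp only [List.foldl_cons, ih, pvG]
    split_ifs <;> simp

theorem pvG_add3 (r : List Char) (c : Int) : pvG r (c + 3) = pvG r c := by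
  induction r generalizing c with
  | nil => rfl
  | cons x xs ih =>
    have hm : PySem.Int.mod (c + 3) 3 = PySem.Int.mod c 3 := by
      rw [PySem.Int.mod_eq_emod_of_pos (by norm_num), PySem.Int.mod_eq_emod_of_pos (by norm_num)]
      omega
    have h1 : c + 3 + 1 = c + 1 + 3 := by ring
    simp only [pvG, hm, h1, ih]

theorem pvG_small (r : List Char) (h : r ≠ []) (h3 : r.length ≤ 3) : pvG r 0 = '.' :: r := by
  have m0 : PySem.Int.mod 0 3 = 0 := by decide
  have m1 : ¬ PySem.Int.mod 1 3 = 0 := by decide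
  have m2 : ¬ PySem.Int.mod 2 3 = 0 := by decide
  match r with
  | [a] => simp [pvG, m0]
  | [a, b] => simp [pvG, m0, m1]
  | [a, b, c] => simp [pvG, m0, m1, m2]
  | a :: b :: c :: d :: rest => simp at h3; omega

theorem pvG_cons (x : Char) (xs : List Char) : pvG (x :: xs) 0 = '.' :: x :: pvG xs 1 := by
  have m0 : PySem.Int.mod 0 3 = 0 := by decide
  simp [pvG, m0]

theorem pvChunks_small (s : List Char) (h : s ≠ []) (h3 : s.length ≤ 3) : pvChunks s = [s] := by
  rw [pvChunks]
  simp only [h, dite_false]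
  rw [PySem.List.slice_from_neg_ofNat s 3 (by omega), PySem.List.slice_to_neg_ofNat s 3 (by omega)]
  have : s.length - 3 = 0 := by omega
  rw [this]
  simp [pvChunks]

theorem pvChunks_ne_nil (s : List Char) (h : s ≠ []) : pvChunks s ≠ [] := by
  rw [pvChunks]; simp [h]

theorem pvJoin_append (sep : List Char) (X : List (List Char)) (y : List Char) (h : X ≠ []) :
    PySem.Chars.join sep (X ++ [y]) = PySem.Chars.join sep X ++ sep ++ y := by
  induction X with
  | nil => exact absurd rfl h
  | cons p X' ih =>
    cases X' with
    | nil => simp [PySem.Chars.join_cons_cons, PySem.Chars.join_singleton]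
    | cons q X'' =>
      rw [show (p :: q :: X'') ++ [y] = p :: ((q :: X'') ++ [y]) from by simp,
          show (q :: X'') ++ [y] = q :: (X'' ++ [y]) from rfl,
          PySem.Chars.join_cons_cons,
          show q :: (X'' ++ [y]) = (q :: X'') ++ [y] from rfl,
          ih (by simp), PySem.Chars.join_cons_cons]
      simp [List.append_assoc]

theorem pvMain (n : Nat) : ∀ r : List Char, r.length ≤ n →
    (pvG r 0).reverse.dropLast = PySem.Chars.join ['.'] (pvChunks r.reverse).reverse := by
  induction n with
  | zero =>
    intro r hr
    have : r = [] := List.eq_nil_of_length_eq_zero (by omega)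
    subst this
    simp [pvG, pvChunks, PySem.Chars.join_nil]
  | succ n ih =>
    intro r hr
    rcases eq_or_ne r [] with h | h
    · subst h; simp [pvG, pvChunks, PySem.Chars.join_nil]
    by_cases h3 : r.length ≤ 3
    · -- short case: one chunk
      rw [pvG_small r h h3]
      have hr' : r.reverse ≠ [] := by simpa using h
      have hr3 : r.reverse.length ≤ 3 := by simpa using h3
      rw [pvChunks_small r.reverse hr' hr3, List.reverse_singleton, PySem.Chars.join_singleton]
      simp
    · -- long case: peel three characters
      rcases r with _ | ⟨a, r⟩
      · exact absurd rfl h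
      rcases r with _ | ⟨b, r⟩
      · simp at h3
      rcases r with _ | ⟨c, rest⟩
      · simp at h3
      have hrest : rest ≠ [] := by
        intro h0; subst h0; simp at h3
      -- compute pvG on the first three characters
      have hg : pvG (a :: b :: c :: rest) 0 = '.' :: a :: b :: c :: pvG rest 0 := by
        have e4 : pvG rest 3 = pvG rest 0 := by simpa using pvG_add3 rest 0
        norm_num [pvG, e4, show PySem.Int.mod 0 3 = 0 from by decide,
          show PySem.Int.mod 1 3 = 1 from by decide, show PySem.Int.mod 2 3 = 2 from by decide]
      rw [hg]
      -- left side
      obtain ⟨y, ys, hrw⟩ : ∃ y ys, rest = y :: ys := by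
        cases rest with
        | nil => exact absurd rfl hrest
        | cons y ys => exact ⟨y, ys, rfl⟩
      have hgr : pvG rest 0 = '.' :: y :: pvG ys 1 := by rw [hrw]; exact pvG_cons y ys
      have hih : (pvG rest 0).reverse.dropLast
          = PySem.Chars.join ['.'] (pvChunks rest.reverse).reverse := by
        apply ih rest
        have : rest.length + 3 ≤ n + 1 := by simpa using hr
        omega
      have hLdrop : ('.' :: a :: b :: c :: pvG rest 0).reverse.dropLast
          = (pvG rest 0).reverse.dropLast ++ ['.'] ++ [c, b, a] := by
        rw [hgr]
        simp
      rw [hLdrop, hih]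
      -- right side
      have hsplit : (a :: b :: c :: rest).reverse = rest.reverse ++ [c, b, a] := by simp
      have hlen : (rest.reverse ++ [c, b, a]).length - 3 = rest.reverse.length := by
        simp
      have hch : pvChunks ((a :: b :: c :: rest).reverse)
          = [c, b, a] :: pvChunks rest.reverse := by
        rw [hsplit, pvChunks]
        have hne : rest.reverse ++ [c, b, a] ≠ [] := by simp
        simp only [hne, dite_false]
        rw [PySem.List.slice_from_neg_ofNat _ 3 (by omega),
            PySem.List.slice_to_neg_ofNat _ 3 (by omega), hlen]
        rw [List.drop_left, List.take_left]
      rw [hch, List.reverse_cons,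
          pvJoin_append ['.'] _ _ (by simp [pvChunks_ne_nil rest.reverse (by simpa using hrest)])]
      try simp [List.append_assoc]

-- ===== VERDICT (by name: the statement is the Claim_ definition above) =====
theorem price_filter_spec : Claim_equal_price_filter := by
  intro price _
  show price_filter price = price_filter_alt price
  unfold price_filter price_filter_alt
  simp only [PySem.List.slice?_none_none_neg_one, Option.getD_some, pvFold_eq,
    List.nil_append, PySem.List.slice_to_neg_one]
  congr 1
  simpa using pvMain (PySem.Int.toChars price).reverse.length (PySem.Int.toChars price).reverse le_rfl
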